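-- pv_equiv track=rewrite | github.com/AlphaMoury/dashboard | Metodos.py | calculoFRI
-- ===== SOURCE A (Python) =====
-- def calculoFRI(columna):
--     fri = [0, 0, 0, 0]
--     for estado in columna:
--         if estado == 'Fallecido':
--             fri[0] += 1
--         elif estado == 'Recuperado':
--             fri[1] += 1
--         else:
--             fri[2] += 1
--     fri[3] = fri[0] + fri[1] + fri[2]
--     return fri
-- ===== SOURCE B (Python) =====
-- def calculoFRI(columna):
--     f = columna.count('Fallecido')
--     r = columna.count('Recuperado')
--     n = len(columna)
--     return [f, r, n - f - r, n]
-- ===== Notes on version B (the rewrite author's own statement) =====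
-- stated objective: idiomatic
-- what changed: Replaces the per-element three-way branch with two list.count calls; the else-bucket and the total are derived by subtraction/len instead of being accumulated.
import Mathlib
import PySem

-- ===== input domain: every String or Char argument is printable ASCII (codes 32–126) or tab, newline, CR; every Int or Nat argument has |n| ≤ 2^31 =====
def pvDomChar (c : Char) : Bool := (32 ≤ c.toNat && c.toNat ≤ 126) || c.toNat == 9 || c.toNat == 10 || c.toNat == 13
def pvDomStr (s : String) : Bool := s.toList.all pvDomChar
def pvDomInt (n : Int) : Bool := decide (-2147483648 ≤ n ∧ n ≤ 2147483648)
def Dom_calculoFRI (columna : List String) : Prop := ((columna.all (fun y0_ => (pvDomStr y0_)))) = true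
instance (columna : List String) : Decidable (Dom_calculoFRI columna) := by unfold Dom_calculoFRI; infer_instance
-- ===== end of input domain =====

-- B replaces A's per-element three-way branch by two count calls, deriving the else-bucket and total by subtraction (idiomatic).

-- ===== PORT A =====
-- A's loop keeps fri[0..2]; fri[3] is set after the loop.
def calculoFRI (columna : List String) : List Int :=
  let fri := columna.foldl
    (fun (fri : Int × Int × Int) estado =>
      if estado == "Fallecido" then (fri.1 + 1, fri.2.1, fri.2.2)
      else if estado == "Recuperado" then (fri.1, fri.2.1 + 1, fri.2.2)
      else (fri.1, fri.2.1, fri.2.2 + 1))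
    (0, 0, 0)
  [fri.1, fri.2.1, fri.2.2, fri.1 + fri.2.1 + fri.2.2]

-- ===== PORT B =====
def calculoFRI_alt (columna : List String) : List Int :=
  let f : Int := PySem.List.count columna "Fallecido"
  let r : Int := PySem.List.count columna "Recuperado"
  let n : Int := columna.length
  [f, r, n - f - r, n]

-- ===== PRECONDITION & SPEC =====
def Spec_calculoFRI (columna : List String) (out : List Int) : Prop := out = calculoFRI_alt columna
instance (columna : List String) (out : List Int) : Decidable (Spec_calculoFRI columna out) := by unfold Spec_calculoFRI; infer_instance

-- ===== CLAIM (what is proved, stated in full; the proofs are below) =====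
def Claim_equal_calculoFRI : Prop := ∀ (columna : List String), Dom_calculoFRI columna → Spec_calculoFRI columna (calculoFRI columna)

-- ===== LEMMAS AND PROOFS =====
theorem calculoFRI_foldl_eq (columna : List String) (a b c : Int) :
    columna.foldl
      (fun (fri : Int × Int × Int) estado =>
        if estado == "Fallecido" then (fri.1 + 1, fri.2.1, fri.2.2)
        else if estado == "Recuperado" then (fri.1, fri.2.1 + 1, fri.2.2)
        else (fri.1, fri.2.1, fri.2.2 + 1))
      (a, b, c)
    = (a + columna.count "Fallecido", b + columna.count "Recuperado",
       c + ((columna.length : Int) - columna.count "Fallecido" - columna.count "Recuperado")) := by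
  induction columna generalizing a b c with
  | nil => simp
  | cons x xs ih =>
    rw [List.foldl_cons]
    by_cases hf : x = "Fallecido"
    · rw [if_pos (by simp [hf]), ih]
      simp [hf, Prod.ext_iff]
      omega
    · by_cases hr : x = "Recuperado"
      · rw [if_neg (by simp [hf]), if_pos (by simp [hr]), ih]
        simp [hr, Prod.ext_iff]
        omega
      · rw [if_neg (by simp [hf]), if_neg (by simp [hr]), ih]
        simp [hf, hr, Prod.ext_iff]
        omega

-- ===== VERDICT (by name: the statement is the Claim_ definition above) =====
theorem calculoFRI_spec : Claim_equal_calculoFRI := by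
  intro columna _
  unfold Spec_calculoFRI calculoFRI calculoFRI_alt
  rw [calculoFRI_foldl_eq]
  simp [PySem.List.count_eq]
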